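-- pv_equiv track=rewrite | github.com/daftpunk6161/ROM-Sorter-Pro | src/core/normalization.py | _infer_input_kinds_from_extensions
-- ===== SOURCE A (Python) =====
-- from typing import Any, Dict, Iterable, List, Literal, Optional, Tuple
--
-- InputKind = Literal[
--     "RawRom",
--     "ArchiveSet",
--     "DiscImage",
--     "DiscTrackSet",
--     "GameFolderSet",
-- ]
--
-- def _infer_input_kinds_from_extensions(exts: List[str]) -> List[InputKind]:
--     norm_exts = [str(ext).lower() if str(ext).startswith(".") else f".{str(ext).lower()}" for ext in exts]
--     kinds: List[InputKind] = []
--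
--     track_exts = {".cue", ".gdi"}
--     disc_exts = {".iso", ".bin", ".img", ".mdf", ".nrg", ".cdi", ".chd", ".gcz", ".rvz", ".wbfs"}
--     archive_exts = {".zip", ".7z", ".rar", ".tar", ".gz", ".bz2", ".xz", ".tar.gz", ".tar.bz2"}
--
--     if any(ext in track_exts for ext in norm_exts):
--         kinds.append("DiscTrackSet")
--     if any(ext in disc_exts for ext in norm_exts):
--         kinds.append("DiscImage")
--     if any(ext in archive_exts for ext in norm_exts):
--         kinds.append("ArchiveSet")
--     if not kinds:
--         kinds.append("RawRom")
--
--     return kinds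
-- ===== SOURCE B (Python) =====
-- _EXT_KIND = {}
-- for _e in (".cue", ".gdi"):
--     _EXT_KIND[_e] = "DiscTrackSet"
-- for _e in (".iso", ".bin", ".img", ".mdf", ".nrg", ".cdi", ".chd", ".gcz", ".rvz", ".wbfs"):
--     _EXT_KIND[_e] = "DiscImage"
-- for _e in (".zip", ".7z", ".rar", ".tar", ".gz", ".bz2", ".xz", ".tar.gz", ".tar.bz2"):
--     _EXT_KIND[_e] = "ArchiveSet"
--
--
-- def _infer_input_kinds_from_extensions(exts):
--     found = set()
--     for ext in exts:
--         e = str(ext).lower() if str(ext).startswith(".") else f".{str(ext).lower()}"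
--         k = _EXT_KIND.get(e)
--         if k is not None:
--             found.add(k)
--     kinds = [k for k in ("DiscTrackSet", "DiscImage", "ArchiveSet") if k in found]
--     return kinds if kinds else ["RawRom"]
-- ===== Notes on version B (the rewrite author's own statement) =====
-- stated objective: idiomatic
-- what changed: Replaces A's three separate any()-scans over three extension sets by a single merged extension-to-kind dictionary built once at module level, one pass over the inputs collecting the kinds found into a set, and emission of the kinds in the fixed canonical order.
import Mathlib
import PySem

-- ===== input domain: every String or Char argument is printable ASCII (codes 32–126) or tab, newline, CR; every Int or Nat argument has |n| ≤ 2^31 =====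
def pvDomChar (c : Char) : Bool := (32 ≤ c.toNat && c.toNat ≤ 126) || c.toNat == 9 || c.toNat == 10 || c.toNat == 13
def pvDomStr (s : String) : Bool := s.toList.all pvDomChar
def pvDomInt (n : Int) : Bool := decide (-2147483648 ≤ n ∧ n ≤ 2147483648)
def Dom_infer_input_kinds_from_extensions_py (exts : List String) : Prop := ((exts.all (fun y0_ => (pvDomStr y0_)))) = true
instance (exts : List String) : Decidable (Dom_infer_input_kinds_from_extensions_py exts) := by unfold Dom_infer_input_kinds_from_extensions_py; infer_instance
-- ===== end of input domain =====

-- B replaces A's three sequential any()-scans over the three extension sets by one merged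
-- extension→kind dictionary and a single pass collecting the found kinds, then emits them in
-- the fixed order; objective: idiomatic single-pass decomposition (return value only).

-- shared normalization: `str(ext).lower() if str(ext).startswith(".") else f".{str(ext).lower()}"`
-- (the identical expression appears in both Pythons)
def pvNormExt (ext : String) : String :=
  if PySem.Str.startswith ext "." then PySem.Str.lower ext
  else String.ofList ('.' :: (PySem.Str.lower ext).toList)

-- ===== PORT A =====
def infer_input_kinds_from_extensions_py (exts : List String) : List String :=
  let norm_exts := exts.map pvNormExt
  let kinds : List String := []
  let track_exts : PySem.Set String := PySem.Set.ofList [".cue", ".gdi"]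
  let disc_exts : PySem.Set String :=
    PySem.Set.ofList [".iso", ".bin", ".img", ".mdf", ".nrg", ".cdi", ".chd", ".gcz", ".rvz", ".wbfs"]
  let archive_exts : PySem.Set String :=
    PySem.Set.ofList [".zip", ".7z", ".rar", ".tar", ".gz", ".bz2", ".xz", ".tar.gz", ".tar.bz2"]
  let kinds := if norm_exts.any (fun e => PySem.Set.contains track_exts e) then kinds ++ ["DiscTrackSet"] else kinds
  let kinds := if norm_exts.any (fun e => PySem.Set.contains disc_exts e) then kinds ++ ["DiscImage"] else kinds
  let kinds := if norm_exts.any (fun e => PySem.Set.contains archive_exts e) then kinds ++ ["ArchiveSet"] else kinds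
  let kinds := if kinds.isEmpty then kinds ++ ["RawRom"] else kinds
  kinds

-- ===== PORT B =====
-- module-level merged table _EXT_KIND (insertion order; keys are distinct)
def pvExtKind : PySem.Dict String String := PySem.Dict.mk
  [(".cue", "DiscTrackSet"), (".gdi", "DiscTrackSet"),
   (".iso", "DiscImage"), (".bin", "DiscImage"), (".img", "DiscImage"), (".mdf", "DiscImage"),
   (".nrg", "DiscImage"), (".cdi", "DiscImage"), (".chd", "DiscImage"), (".gcz", "DiscImage"),
   (".rvz", "DiscImage"), (".wbfs", "DiscImage"),
   (".zip", "ArchiveSet"), (".7z", "ArchiveSet"), (".rar", "ArchiveSet"), (".tar", "ArchiveSet"),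
   (".gz", "ArchiveSet"), (".bz2", "ArchiveSet"), (".xz", "ArchiveSet"),
   (".tar.gz", "ArchiveSet"), (".tar.bz2", "ArchiveSet")]

def infer_input_kinds_from_extensions_py_alt (exts : List String) : List String :=
  let found : PySem.Set String :=
    exts.foldl (fun found ext =>
      match pvExtKind.get? (pvNormExt ext) with
      | some k => PySem.Set.add found k
      | none => found) PySem.Set.empty
  let kinds := ["DiscTrackSet", "DiscImage", "ArchiveSet"].filter (fun k => PySem.Set.contains found k)
  if kinds.isEmpty then ["RawRom"] else kinds

-- ===== PRECONDITION & SPEC =====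
def Spec_infer_input_kinds_from_extensions_py (exts : List String) (out : List String) : Prop := out = infer_input_kinds_from_extensions_py_alt exts
instance (exts : List String) (out : List String) : Decidable (Spec_infer_input_kinds_from_extensions_py exts out) := by unfold Spec_infer_input_kinds_from_extensions_py; infer_instance

-- ===== CLAIM (what is proved, stated in full; the proofs are below) =====
def Claim_equal_infer_input_kinds_from_extensions_py : Prop := ∀ (exts : List String), Dom_infer_input_kinds_from_extensions_py exts → Spec_infer_input_kinds_from_extensions_py exts (infer_input_kinds_from_extensions_py exts)

-- ===== LEMMAS AND PROOFS =====

-- membership in B's accumulated `found` set = "some extension looks up to kind k"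
lemma mem_found (exts : List String) (acc : PySem.Set String) (k : String) :
    k ∈ (exts.foldl (fun found ext =>
        match pvExtKind.get? (pvNormExt ext) with
        | some k => PySem.Set.add found k
        | none => found) acc)
      ↔ k ∈ acc ∨ ∃ e ∈ exts, pvExtKind.get? (pvNormExt e) = some k := by
  induction exts generalizing acc with
  | nil => simp
  | cons x xs ih =>
      simp only [List.foldl_cons, List.mem_cons]
      cases h : pvExtKind.get? (pvNormExt x) with
      | none => rw [ih]; simp [h]
      | some v => rw [ih]; simp [PySem.Set.mem_add, h]; tauto

-- first-match lookup in a dict literal with distinct keys is pair membership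
lemma get?_mk_eq_some_iff (ps : List (String × String)) (h : (ps.map Prod.fst).Nodup) (e k : String) :
    (PySem.Dict.mk ps).get? e = some k ↔ (e, k) ∈ ps := by
  induction ps with
  | nil => simp [PySem.Dict.get?]
  | cons p ps ih =>
      obtain ⟨a, b⟩ := p
      rw [List.map_cons, List.nodup_cons] at h
      rw [PySem.Dict.get?_mk_cons]
      by_cases he : a = e
      · subst he
        simp only [BEq.rfl, if_true, Option.some_inj, List.mem_cons, Prod.mk.injEq, true_and]
        constructor
        · rintro rfl; exact Or.inl rfl
        · rintro (rfl | hm)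
          · rfl
          · exact absurd (List.mem_map_of_mem hm) h.1
      · have hbe : (a == e) = false := by simp [he]
        rw [hbe, if_neg (by simp), ih h.2]
        simp only [List.mem_cons, Prod.mk.injEq]
        constructor
        · exact Or.inr
        · rintro (⟨rfl, -⟩ | hm)
          · exact absurd rfl he
          · exact hm

-- the merged table looked up at each kind is exactly membership in A's corresponding set
lemma get?_track (e : String) :
    pvExtKind.get? e = some "DiscTrackSet" ↔ e ∈ [".cue", ".gdi"] := by
  unfold pvExtKind; rw [get?_mk_eq_some_iff _ (by decide)]; simp

lemma get?_disc (e : String) :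
    pvExtKind.get? e = some "DiscImage"
      ↔ e ∈ [".iso", ".bin", ".img", ".mdf", ".nrg", ".cdi", ".chd", ".gcz", ".rvz", ".wbfs"] := by
  unfold pvExtKind; rw [get?_mk_eq_some_iff _ (by decide)]; simp

lemma get?_archive (e : String) :
    pvExtKind.get? e = some "ArchiveSet"
      ↔ e ∈ [".zip", ".7z", ".rar", ".tar", ".gz", ".bz2", ".xz", ".tar.gz", ".tar.bz2"] := by
  unfold pvExtKind; rw [get?_mk_eq_some_iff _ (by decide)]; simp

-- B's membership test of a kind in `found` equals A's any()-scan over the matching set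
lemma found_kind (exts : List String) (k : String) (ks : List String)
    (hk : ∀ e, pvExtKind.get? e = some k ↔ e ∈ ks) :
    PySem.Set.contains
      (exts.foldl (fun found ext =>
        match pvExtKind.get? (pvNormExt ext) with
        | some k => PySem.Set.add found k
        | none => found) PySem.Set.empty) k
      = (exts.map pvNormExt).any (fun e => PySem.Set.contains (PySem.Set.ofList ks) e) := by
  rw [Bool.eq_iff_iff]
  simp [mem_found, hk, List.any_eq_true, PySem.Set.mem_ofList, PySem.Set.empty]

-- ===== VERDICT (by name: the statement is the Claim_ definition above) =====
theorem infer_input_kinds_from_extensions_py_spec : Claim_equal_infer_input_kinds_from_extensions_py := by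
  intro exts _
  unfold Spec_infer_input_kinds_from_extensions_py
  simp only [infer_input_kinds_from_extensions_py, infer_input_kinds_from_extensions_py_alt,
    List.filter_cons, List.filter_nil,
    found_kind exts "DiscTrackSet" [".cue", ".gdi"] get?_track,
    found_kind exts "DiscImage"
      [".iso", ".bin", ".img", ".mdf", ".nrg", ".cdi", ".chd", ".gcz", ".rvz", ".wbfs"] get?_disc,
    found_kind exts "ArchiveSet"
      [".zip", ".7z", ".rar", ".tar", ".gz", ".bz2", ".xz", ".tar.gz", ".tar.bz2"] get?_archive]
  cases hb1 : (exts.map pvNormExt).any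
      (fun e => PySem.Set.contains (PySem.Set.ofList [".cue", ".gdi"]) e) <;>
  cases hb2 : (exts.map pvNormExt).any (fun e => PySem.Set.contains
      (PySem.Set.ofList [".iso", ".bin", ".img", ".mdf", ".nrg", ".cdi", ".chd", ".gcz", ".rvz", ".wbfs"]) e) <;>
  cases hb3 : (exts.map pvNormExt).any (fun e => PySem.Set.contains
      (PySem.Set.ofList [".zip", ".7z", ".rar", ".tar", ".gz", ".bz2", ".xz", ".tar.gz", ".tar.bz2"]) e) <;>
  simp_all
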